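-- pv_equiv track=rewrite | github.com/SundaresanC/Drivesense-AI | reasoning_agent.py | _assess_threats
-- ===== SOURCE A (Python) =====
-- from typing import Dict, List, Any
--
-- def _assess_threats(objects: List[Dict], lane_info: Dict) -> List[Dict]:
--     """Identify immediate threats in the scene"""
--     threats = []
--
--     # Check for pedestrians too close
--     pedestrians = [o for o in objects if 'pedestrian' in o.get('friendly_label', '').lower()]
--     for ped in pedestrians:
--         distance = ped.get('distance_estimate', 'far')
--         position = ped.get('direction', 'center')
--
--         if distance in ['near', 'medium']:
--             threats.append({
--                 'type': 'pedestrian_crossing',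
--                 'severity': 'high' if distance == 'near' else 'medium',
--                 'position': position,
--                 'action': f'Pedestrian {position}. Prepare to brake.',
--             })
--
--     # Check for vehicles too close
--     vehicles = [o for o in objects if any(v in o.get('friendly_label', '').lower() for v in ['vehicle', 'car', 'truck', 'bus'])]
--     for veh in vehicles:
--         distance = veh.get('distance_estimate', 'far')
--         position = veh.get('direction', 'center')
--
--         if distance == 'near':
--             threats.append({
--                 'type': 'vehicle_collision_risk',
--                 'severity': 'high',
--                 'position': position,
--                 'action': f'Vehicle ahead {position}. Maintain safe distance.',
--             })
--
--     # Check for traffic signs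
--     traffic_signs = [o for o in objects if 'traffic' in o.get('friendly_label', '').lower() or 'stop' in o.get('friendly_label', '').lower()]
--     if traffic_signs:
--         threats.append({
--             'type': 'traffic_sign',
--             'severity': 'medium',
--             'action': f'Traffic sign detected: {traffic_signs[0]["friendly_label"]}',
--         })
--
--     # Check lane drifting
--     if lane_info.get('lane_position') != 'center':
--         threats.append({
--             'type': 'lane_drift',
--             'severity': 'low',
--             'action': f'Drifting {lane_info["lane_position"]}. Adjust steering.',
--         })
--
--     return threats
-- ===== SOURCE B (Python) =====
-- def _assess_threats(objects, lane_info):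
--     """Identify immediate threats in the scene (single fused pass over objects)."""
--     ped_threats = []
--     veh_threats = []
--     sign_label = None
--
--     for o in objects:
--         label = o.get('friendly_label', '').lower()
--
--         if 'pedestrian' in label:
--             distance = o.get('distance_estimate', 'far')
--             if distance in ('near', 'medium'):
--                 position = o.get('direction', 'center')
--                 ped_threats.append({
--                     'type': 'pedestrian_crossing',
--                     'severity': 'high' if distance == 'near' else 'medium',
--                     'position': position,
--                     'action': f'Pedestrian {position}. Prepare to brake.',
--                 })
--
--         if any(v in label for v in ('vehicle', 'car', 'truck', 'bus')):
--             if o.get('distance_estimate', 'far') == 'near':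
--                 position = o.get('direction', 'center')
--                 veh_threats.append({
--                     'type': 'vehicle_collision_risk',
--                     'severity': 'high',
--                     'position': position,
--                     'action': f'Vehicle ahead {position}. Maintain safe distance.',
--                 })
--
--         if sign_label is None and ('traffic' in label or 'stop' in label):
--             sign_label = o['friendly_label']
--
--     threats = ped_threats + veh_threats
--     if sign_label is not None:
--         threats.append({
--             'type': 'traffic_sign',
--             'severity': 'medium',
--             'action': f'Traffic sign detected: {sign_label}',
--         })
--     if lane_info.get('lane_position') != 'center':
--         threats.append({
--             'type': 'lane_drift',
--             'severity': 'low',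
--             'action': f'Drifting {lane_info["lane_position"]}. Adjust steering.',
--         })
--     return threats
-- ===== Notes on version B (the rewrite author's own statement) =====
-- stated objective: alternative
-- what changed: B replaces A's three separate filter-then-loop scans over objects (pedestrians, vehicles, traffic signs) with a single fused pass maintaining two threat lists and the first traffic-sign label, concatenating afterwards; Pre_ excludes the inputs where both programs raise KeyError (lane_info lacking 'lane_position').
import Mathlib
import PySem

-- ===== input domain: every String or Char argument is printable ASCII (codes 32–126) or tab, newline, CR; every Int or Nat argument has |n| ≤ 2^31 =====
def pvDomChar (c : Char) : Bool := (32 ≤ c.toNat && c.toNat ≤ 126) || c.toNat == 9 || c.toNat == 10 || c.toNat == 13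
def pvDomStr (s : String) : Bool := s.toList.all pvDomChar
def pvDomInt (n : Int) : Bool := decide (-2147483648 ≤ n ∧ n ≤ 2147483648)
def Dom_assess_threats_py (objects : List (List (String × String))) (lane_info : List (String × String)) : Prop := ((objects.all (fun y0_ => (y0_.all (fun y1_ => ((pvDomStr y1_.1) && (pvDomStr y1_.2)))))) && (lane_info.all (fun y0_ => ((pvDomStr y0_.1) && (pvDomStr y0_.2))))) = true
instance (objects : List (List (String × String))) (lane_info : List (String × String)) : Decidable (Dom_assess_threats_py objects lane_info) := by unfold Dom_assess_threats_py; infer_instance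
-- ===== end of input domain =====

-- B fuses A's three scans over `objects` into one pass with separate accumulators (objective: alternative, same cost class).
-- Both Pythons raise KeyError when 'lane_position' is missing from lane_info; Pre_ excludes exactly those inputs.

-- shared helpers: the dict lookups and threat-dict literals both Pythons build identically
def pvGetD (o : List (String × String)) (k d : String) : String := (PySem.Dict.mk o).getD k d
def pvLbl (o : List (String × String)) : String := PySem.Str.lower (pvGetD o "friendly_label" "")
def pvIsPed (o : List (String × String)) : Bool := PySem.Str.isIn "pedestrian" (pvLbl o)
def pvIsVeh (o : List (String × String)) : Bool :=
  (["vehicle", "car", "truck", "bus"] : List String).any (fun v => PySem.Str.isIn v (pvLbl o))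
def pvIsSign (o : List (String × String)) : Bool :=
  PySem.Str.isIn "traffic" (pvLbl o) || PySem.Str.isIn "stop" (pvLbl o)
def pvPedThreat (o : List (String × String)) : List (String × String) :=
  [("type", "pedestrian_crossing"),
   ("severity", if pvGetD o "distance_estimate" "far" = "near" then "high" else "medium"),
   ("position", pvGetD o "direction" "center"),
   ("action", "Pedestrian " ++ pvGetD o "direction" "center" ++ ". Prepare to brake.")]
def pvVehThreat (o : List (String × String)) : List (String × String) :=
  [("type", "vehicle_collision_risk"),
   ("severity", "high"),
   ("position", pvGetD o "direction" "center"),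
   ("action", "Vehicle ahead " ++ pvGetD o "direction" "center" ++ ". Maintain safe distance.")]
def pvSignThreat (lbl : String) : List (String × String) :=
  [("type", "traffic_sign"), ("severity", "medium"), ("action", "Traffic sign detected: " ++ lbl)]
def pvLaneThreat (pos : String) : List (String × String) :=
  [("type", "lane_drift"), ("severity", "low"), ("action", "Drifting " ++ pos ++ ". Adjust steering.")]

-- ===== PORT A =====
-- three scans: filter pedestrians / vehicles / signs, loop over each, then the lane check.
-- traffic_signs[0]["friendly_label"] cannot raise (a matching object has the key), so pvGetD is exact there;
-- lane_info["lane_position"] raises when the key is absent — those inputs are outside Pre_.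
def assess_threats_py (objects : List (List (String × String))) (lane_info : List (String × String)) : List (List (String × String)) :=
  let threats : List (List (String × String)) := []
  let pedestrians := objects.filter pvIsPed
  let threats := pedestrians.foldl (fun acc ped =>
      if (["near", "medium"] : List String).contains (pvGetD ped "distance_estimate" "far")
      then acc ++ [pvPedThreat ped] else acc) threats
  let vehicles := objects.filter pvIsVeh
  let threats := vehicles.foldl (fun acc veh =>
      if pvGetD veh "distance_estimate" "far" == "near"
      then acc ++ [pvVehThreat veh] else acc) threats
  let traffic_signs := objects.filter pvIsSign
  let threats := match traffic_signs with
    | [] => threats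
    | first :: _ => threats ++ [pvSignThreat (pvGetD first "friendly_label" "")]
  if (PySem.Dict.mk lane_info).get? "lane_position" ≠ some "center"
  then threats ++ [pvLaneThreat (((PySem.Dict.mk lane_info).get? "lane_position").getD "")]
  else threats

-- ===== PORT B =====
-- one pass: a triple accumulator (pedestrian threats, vehicle threats, first sign label).
def pvStep (st : List (List (String × String)) × List (List (String × String)) × Option String)
    (o : List (String × String)) :
    List (List (String × String)) × List (List (String × String)) × Option String :=
  let peds := if pvIsPed o && (["near", "medium"] : List String).contains (pvGetD o "distance_estimate" "far")
              then st.1 ++ [pvPedThreat o] else st.1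
  let vehs := if pvIsVeh o && (pvGetD o "distance_estimate" "far" == "near")
              then st.2.1 ++ [pvVehThreat o] else st.2.1
  let sign := match st.2.2 with
              | some s => some s
              | none => if pvIsSign o then some (pvGetD o "friendly_label" "") else none
  (peds, vehs, sign)

def assess_threats_py_alt (objects : List (List (String × String))) (lane_info : List (String × String)) : List (List (String × String)) :=
  let st := objects.foldl pvStep ([], [], none)
  let threats := st.1 ++ st.2.1 ++ (match st.2.2 with
    | some s => [pvSignThreat s]
    | none => [])
  if (PySem.Dict.mk lane_info).get? "lane_position" ≠ some "center"
  then threats ++ [pvLaneThreat (((PySem.Dict.mk lane_info).get? "lane_position").getD "")]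
  else threats

-- ===== PRECONDITION & SPEC =====
-- Pre_ excludes exactly the inputs where A (and B) raise KeyError: lane_info lacking the 'lane_position' key.
def Pre_assess_threats_py (objects : List (List (String × String))) (lane_info : List (String × String)) : Prop :=
  (PySem.Dict.mk lane_info).contains "lane_position" = true
instance (objects : List (List (String × String))) (lane_info : List (String × String)) : Decidable (Pre_assess_threats_py objects lane_info) := by unfold Pre_assess_threats_py; infer_instance

def pvWitness_assess_threats_py : (List (List (String × String))) × (List (String × String)) :=
  ([[("friendly_label", "pedestrian"), ("distance_estimate", "near")]], [("lane_position", "left")])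

def Spec_assess_threats_py (objects : List (List (String × String))) (lane_info : List (String × String)) (out : List (List (String × String))) : Prop := out = assess_threats_py_alt objects lane_info
instance (objects : List (List (String × String))) (lane_info : List (String × String)) (out : List (List (String × String))) : Decidable (Spec_assess_threats_py objects lane_info out) := by unfold Spec_assess_threats_py; infer_instance

-- ===== CLAIM (what is proved, stated in full; the proofs are below) =====
def Claim_equal_assess_threats_py : Prop := ∀ (objects : List (List (String × String))) (lane_info : List (String × String)), Dom_assess_threats_py objects lane_info → Pre_assess_threats_py objects lane_info → Spec_assess_threats_py objects lane_info (assess_threats_py objects lane_info)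

-- ===== LEMMAS AND PROOFS =====

-- what B's fused loop computes, expressed in A's three-scan vocabulary
theorem pvStep_foldl (l : List (List (String × String)))
    (p v : List (List (String × String))) (sg : Option String) :
    l.foldl pvStep (p, v, sg) =
      (p ++ ((l.filter (fun o => pvIsPed o && (["near", "medium"] : List String).contains (pvGetD o "distance_estimate" "far"))).map pvPedThreat),
       v ++ ((l.filter (fun o => pvIsVeh o && (pvGetD o "distance_estimate" "far" == "near"))).map pvVehThreat),
       sg.orElse (fun _ => ((l.filter pvIsSign).head?).map (fun o => pvGetD o "friendly_label" ""))) := by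
  induction l generalizing p v sg with
  | nil => simp
  | cons o l ih =>
    simp only [List.foldl_cons, pvStep, List.filter_cons]
    cases hp : pvIsPed o && (["near", "medium"] : List String).contains (pvGetD o "distance_estimate" "far") <;>
    cases hv : pvIsVeh o && (pvGetD o "distance_estimate" "far" == "near") <;>
    cases hsg : sg <;>
    cases hs : pvIsSign o <;>
      simp_all [Option.orElse]

theorem assess_threats_py_spec : Claim_equal_assess_threats_py := by
  intro objects lane_info _ _
  show assess_threats_py objects lane_info = assess_threats_py_alt objects lane_info
  unfold assess_threats_py assess_threats_py_alt
  rw [pvStep_foldl]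
  simp only [PySem.List.foldl_append_if, List.filter_filter, List.nil_append]
  have hped : ∀ o, (pvIsPed o && (["near", "medium"] : List String).contains (pvGetD o "distance_estimate" "far"))
      = ((["near", "medium"] : List String).contains (pvGetD o "distance_estimate" "far") && pvIsPed o) := by
    intro o; exact Bool.and_comm _ _
  have hveh : ∀ o, (pvIsVeh o && (pvGetD o "distance_estimate" "far" == "near"))
      = ((pvGetD o "distance_estimate" "far" == "near") && pvIsVeh o) := by
    intro o; exact Bool.and_comm _ _
  simp only [hped, hveh, Option.orElse]
  cases h : (objects.filter pvIsSign) <;> simp [List.append_assoc]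

-- ===== VERDICT (by name: the statement is the Claim_ definition above) =====
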